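-- pv_equiv track=rewrite | github.com/LunaMoonax/Target-search | workflow/scripts/validate_primers.py | find_max_gc_run
-- ===== SOURCE A (Python) =====
-- def find_max_gc_run(sequence):
--     """Find longest consecutive GC run"""
--     max_run = current_run = 0
--     for base in sequence:
--         if base in 'GC':
--             current_run += 1
--             max_run = max(max_run, current_run)
--         else:
--             current_run = 0
--     return max_run
-- ===== SOURCE B (Python) =====
-- def find_max_gc_run(sequence):
--     """Find longest consecutive GC run"""
--     runs = []
--     i, n = 0, len(sequence)
--     while i < n:
--         if sequence[i] in 'GC':
--             j = i
--             while j < n and sequence[j] in 'GC':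
--                 j += 1
--             runs.append(j - i)
--             i = j
--         else:
--             i += 1
--     return max(runs, default=0)
-- ===== Notes on version B (the rewrite author's own statement) =====
-- stated objective: alternative
-- what changed: B materializes the lengths of all maximal G/C runs (skipping over each run with an inner scan) and then reduces with max(runs, default=0), instead of threading current_run/max_run state through a single per-base scan.
import Mathlib
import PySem

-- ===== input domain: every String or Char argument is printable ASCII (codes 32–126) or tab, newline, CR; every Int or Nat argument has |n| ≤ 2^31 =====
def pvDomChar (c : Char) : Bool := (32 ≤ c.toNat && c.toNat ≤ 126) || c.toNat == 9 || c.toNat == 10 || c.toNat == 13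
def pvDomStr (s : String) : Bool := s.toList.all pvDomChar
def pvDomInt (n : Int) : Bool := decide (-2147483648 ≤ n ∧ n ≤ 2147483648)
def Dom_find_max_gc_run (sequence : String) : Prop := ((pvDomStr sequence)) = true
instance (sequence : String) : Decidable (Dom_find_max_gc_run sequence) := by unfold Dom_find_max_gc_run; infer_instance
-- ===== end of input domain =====

-- B replaces A's manual max_run/current_run state machine by materializing the
-- lengths of all maximal G/C runs and reducing with max (default 0): alternative decomposition, same cost.

-- `base in 'GC'` (shared predicate of both Pythons)
def pvGC (c : Char) : Bool := c == 'G' || c == 'C'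

-- ===== PORT A =====
-- A: single scan threading (max_run, current_run)
def find_max_gc_run (sequence : String) : Int :=
  (sequence.toList.foldl
    (fun (st : Int × Int) base =>
      if pvGC base then (max st.1 (st.2 + 1), st.2 + 1) else (st.1, 0))
    (0, 0)).1

-- ===== PORT B =====
-- B's outer while loop: at each G/C base, the inner scan measures the whole run
-- (here: span), records its length, and resumes after the run.
def pvGcRuns : List Char → List Int
  | [] => []
  | c :: cs =>
    if pvGC c then
      ((1 + (cs.takeWhile pvGC).length : Nat) : Int) :: pvGcRuns (cs.dropWhile pvGC)
    else
      pvGcRuns cs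
termination_by l => l.length
decreasing_by
  · simp only [List.length_cons]
    exact Nat.lt_succ_of_le (List.length_dropWhile_le _ _)
  · simp

def find_max_gc_run_alt (sequence : String) : Int :=
  (PySem.List.max? (pvGcRuns sequence.toList) (fun x => x)).getD 0

-- ===== PRECONDITION & SPEC =====
def Spec_find_max_gc_run (sequence : String) (out : Int) : Prop := out = find_max_gc_run_alt sequence
instance (sequence : String) (out : Int) : Decidable (Spec_find_max_gc_run sequence out) := by unfold Spec_find_max_gc_run; infer_instance

-- ===== CLAIM (what is proved, stated in full; the proofs are below) =====
def Claim_equal_find_max_gc_run : Prop := ∀ (sequence : String), Dom_find_max_gc_run sequence → Spec_find_max_gc_run sequence (find_max_gc_run sequence)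

-- ===== LEMMAS AND PROOFS =====

-- abstract value of A's loop tail: longest run in xs, where c is the length of the run in progress
def pvG (c : Int) : List Char → Int
  | [] => c
  | x :: xs => if pvGC x then pvG (c + 1) xs else max c (pvG 0 xs)

theorem pvG_ge (xs : List Char) : ∀ c : Int, c ≤ pvG c xs := by
  induction xs with
  | nil => intro c; simp [pvG]
  | cons x xs ih =>
    intro c
    simp only [pvG]
    split
    · exact le_trans (by omega) (ih (c + 1))
    · exact le_max_left _ _

theorem foldA (xs : List Char) : ∀ (m c : Int), 0 ≤ c → c ≤ m →
    (xs.foldl (fun (st : Int × Int) base =>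
      if pvGC base then (max st.1 (st.2 + 1), st.2 + 1) else (st.1, 0)) (m, c)).1
    = max m (pvG c xs) := by
  induction xs with
  | nil => intro m c h0 hm; simp [pvG]; omega
  | cons x xs ih =>
    intro m c h0 hm
    simp only [List.foldl_cons, pvG]
    split
    · rw [ih (max m (c + 1)) (c + 1) (by omega) (le_max_right _ _)]
      have h1 : c + 1 ≤ pvG (c + 1) xs := pvG_ge xs (c + 1)
      omega
    · rw [ih m 0 le_rfl (by omega)]
      have h2 : (0 : Int) ≤ pvG 0 xs := pvG_ge xs 0
      omega

theorem pvG_run (r : List Char) : ∀ (c : Int) (rest : List Char), (∀ x ∈ r, pvGC x = true) →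
    pvG c (r ++ rest) = pvG (c + r.length) rest := by
  induction r with
  | nil => intro c rest _; simp
  | cons x r ih =>
    intro c rest hall
    have hx : pvGC x = true := hall x (by simp)
    simp only [List.cons_append, pvG, hx, if_pos]
    rw [ih (c + 1) rest (fun y hy => hall y (by simp [hy]))]
    simp only [List.length_cons]
    push_cast
    ring_nf

theorem foldl_max_init (t : List Int) : ∀ a b : Int, t.foldl max (max a b) = max a (t.foldl max b) := by
  induction t with
  | nil => intro a b; simp
  | cons x t ih =>
    intro a b
    simp only [List.foldl_cons, max_assoc]
    exact ih a (max b x)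

-- max(a :: L, default=0) = max a maxD(L), for a ≥ 0
theorem maxD_cons (a : Int) (L : List Int) (ha : 0 ≤ a) :
    (PySem.List.max? (a :: L) (fun x => x)).getD 0 = max a ((PySem.List.max? L (fun x => x)).getD 0) := by
  rw [PySem.List.max?_id_cons]
  cases L with
  | nil => simp [PySem.List.max?]; omega
  | cons b t =>
    rw [PySem.List.max?_id_cons]
    simp only [List.foldl_cons, Option.getD_some]
    exact foldl_max_init t a b

theorem pvG_eq_runs : ∀ (n : Nat) (l : List Char), l.length ≤ n →
    pvG 0 l = (PySem.List.max? (pvGcRuns l) (fun x => x)).getD 0 := by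
  intro n
  induction n with
  | zero =>
    intro l hl
    have : l = [] := List.eq_nil_of_length_eq_zero (by omega)
    subst this; simp [pvG, pvGcRuns, PySem.List.max?]
  | succ n ih =>
    intro l hl
    cases l with
    | nil => simp [pvG, pvGcRuns, PySem.List.max?]
    | cons c cs =>
      by_cases hc : pvGC c = true
      · rw [pvGcRuns]
        simp only [hc, if_pos]
        set r := cs.takeWhile pvGC with hr
        set rest := cs.dropWhile pvGC with hrest
        have hsplit : r ++ rest = cs := List.takeWhile_append_dropWhile
        have hallr : ∀ x ∈ r, pvGC x = true := fun x hx => List.mem_takeWhile_imp hx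
        have h1 : pvG 0 (c :: cs) = pvG ((1 : Int) + r.length) rest := by
          simp only [pvG, hc, if_pos]
          rw [← hsplit, pvG_run r (0 + 1) rest hallr]
          norm_num
        rw [h1, maxD_cons _ _ (by positivity)]
        have hrestlen : rest.length ≤ cs.length := List.length_dropWhile_le _ _
        cases hrc : rest with
        | nil => simp [pvG, pvGcRuns, PySem.List.max?]; omega
        | cons x t =>
          have hxfalse : pvGC x = false := by
            have hne : rest ≠ [] := by simp [hrc]
            have := List.head_dropWhile_not pvGC (l := cs) (by rw [← hrest]; exact hne)
            rwa [show (cs.dropWhile pvGC).head _ = x by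
              have : (cs.dropWhile pvGC) = x :: t := by rw [← hrest]; exact hrc
              simp [this]] at this
          have h2 : pvG ((1 : Int) + r.length) (x :: t) = max ((1 : Int) + r.length) (pvG 0 t) := by
            simp [pvG, hxfalse]
          have h4 : pvGcRuns (x :: t) = pvGcRuns t := by rw [pvGcRuns]; simp [hxfalse]
          have ht : t.length ≤ n := by
            have : rest.length = t.length + 1 := by rw [hrc]; simp
            simp only [List.length_cons] at hl
            omega
          rw [h2, ih t ht, h4]
          congr 1
      · simp only [pvG, hc, if_neg, Bool.false_eq_true, not_false_iff]
        rw [pvGcRuns]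
        simp only [hc, Bool.false_eq_true, if_neg, not_false_iff]
        have : max 0 (pvG 0 cs) = pvG 0 cs := max_eq_right (pvG_ge cs 0)
        rw [this, ih cs (by simp only [List.length_cons] at hl; omega)]

-- ===== VERDICT (by name: the statement is the Claim_ definition above) =====
theorem find_max_gc_run_spec : Claim_equal_find_max_gc_run := by
  intro s _
  unfold Spec_find_max_gc_run find_max_gc_run find_max_gc_run_alt
  rw [foldA s.toList 0 0 le_rfl le_rfl]
  rw [max_eq_right (pvG_ge s.toList 0)]
  exact pvG_eq_runs s.toList.length s.toList le_rfl
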